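-- pv_equiv track=rewrite | github.com/tony-kuo/eagle | scripts/ref2_consensus.py | combinePE
-- ===== SOURCE A (Python) =====
-- def combinePE(data):
--     entry = {}
--     for key in data:
--         t = key.strip().split('\t')
--         if t[0] not in entry:
--             entry[t[0]] = data[key]
--         elif t[0] in entry:
--             entry[t[0]] = (entry[t[0]][0], entry[t[0]][1] + data[key][1], entry[t[0]][2] + data[key][2], entry[t[0]][3] + data[key][3])
--     return(entry)
-- ===== SOURCE B (Python) =====
-- def combinePE(data):
--     # pass 1: group the values by key prefix, in first-occurrence order
--     groups = {}
--     for key in data: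
--         groups.setdefault(key.strip().split('\t')[0], []).append(data[key])
--     # pass 2: reduce each group from its first element (keep field 0, sum fields 1-3)
--     out = {}
--     for p, vals in groups.items():
--         acc = vals[0]
--         for v in vals[1:]:
--             acc = (acc[0], acc[1] + v[1], acc[2] + v[2], acc[3] + v[3])
--         out[p] = acc
--     return out
-- ===== Notes on version B (the rewrite author's own statement) =====
-- stated objective: alternative
-- what changed: A interleaves lookup-and-update in a single loop over the dict; B first groups all values by key prefix into lists (one pass with setdefault/append), then reduces each group left-to-right from its first element in a second pass.
import Mathlib
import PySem

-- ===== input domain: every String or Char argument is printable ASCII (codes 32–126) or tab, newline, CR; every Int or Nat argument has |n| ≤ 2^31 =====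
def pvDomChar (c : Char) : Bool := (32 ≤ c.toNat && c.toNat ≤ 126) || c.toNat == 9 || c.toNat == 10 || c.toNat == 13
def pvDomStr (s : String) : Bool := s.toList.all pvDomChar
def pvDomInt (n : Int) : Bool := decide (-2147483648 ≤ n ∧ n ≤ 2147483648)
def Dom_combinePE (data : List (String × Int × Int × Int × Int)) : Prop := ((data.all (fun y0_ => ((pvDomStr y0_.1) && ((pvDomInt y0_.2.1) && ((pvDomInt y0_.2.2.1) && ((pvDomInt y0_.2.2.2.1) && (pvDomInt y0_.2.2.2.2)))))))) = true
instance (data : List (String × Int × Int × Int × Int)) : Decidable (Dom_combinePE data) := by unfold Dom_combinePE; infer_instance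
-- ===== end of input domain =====

-- B replaces A's single lookup-and-update loop by a grouping pass followed by a
-- per-group left reduction from the group's first element (objective: alternative decomposition).

-- ===== PORT A =====
-- t[0] = key.strip().split('\t')[0]; the separator "\t" is nonempty so split? is
-- always `some`, and a split result is never [], so both defaults are unreachable (exact).
def pvPrefix (key : String) : String :=
  ((PySem.Str.split? (PySem.Str.strip key) "\t").getD []).headD ""

-- `for key in data` over a dict iterates the items; `data[key]` is the item's value.
def combinePE (data : List (String × Int × Int × Int × Int)) : List (String × Int × Int × Int × Int) :=
  (data.foldl (fun entry kv =>
      let t0 := pvPrefix kv.1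
      match PySem.Dict.get? entry t0 with
      | none => PySem.Dict.insert entry t0 kv.2          -- t[0] not in entry
      | some e =>                                        -- t[0] in entry
          PySem.Dict.insert entry t0
            (e.1, e.2.1 + kv.2.2.1, e.2.2.1 + kv.2.2.2.1, e.2.2.2 + kv.2.2.2.2))
    PySem.Dict.empty).items

-- ===== PORT B =====
-- (acc[0], acc[1]+v[1], acc[2]+v[2], acc[3]+v[3])
def pvComb (a b : Int × Int × Int × Int) : Int × Int × Int × Int :=
  (a.1, a.2.1 + b.2.1, a.2.2.1 + b.2.2.1, a.2.2.2 + b.2.2.2)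

-- acc = vals[0]; for v in vals[1:]: acc = comb(acc, v)   (groups are built nonempty, so [] is unreachable)
def pvReduce (vals : List (Int × Int × Int × Int)) : Int × Int × Int × Int :=
  match vals with
  | [] => (0, 0, 0, 0)
  | v :: rest => rest.foldl pvComb v

def combinePE_alt (data : List (String × Int × Int × Int × Int)) : List (String × Int × Int × Int × Int) :=
  let groups :=
    data.foldl (fun g kv => PySem.Dict.modify g (pvPrefix kv.1) [] (· ++ [kv.2]))
      PySem.Dict.empty
  groups.items.map (fun pv => (pv.1, pvReduce pv.2))

-- ===== PRECONDITION & SPEC =====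
def Spec_combinePE (data : List (String × Int × Int × Int × Int)) (out : List (String × Int × Int × Int × Int)) : Prop := out = combinePE_alt data
instance (data : List (String × Int × Int × Int × Int)) (out : List (String × Int × Int × Int × Int)) : Decidable (Spec_combinePE data out) := by unfold Spec_combinePE; infer_instance

-- ===== CLAIM (what is proved, stated in full; the proofs are below) =====
def Claim_equal_combinePE : Prop := ∀ (data : List (String × Int × Int × Int × Int)), Dom_combinePE data → Spec_combinePE data (combinePE data)

-- ===== LEMMAS AND PROOFS =====

-- A's loop step, over (prefix, value) pairs
def pvStepA (e : PySem.Dict String (Int × Int × Int × Int)) (p : String × Int × Int × Int × Int) :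
    PySem.Dict String (Int × Int × Int × Int) :=
  match PySem.Dict.get? e p.1 with
  | none => PySem.Dict.insert e p.1 p.2
  | some x => PySem.Dict.insert e p.1 (pvComb x p.2)

theorem pvStepA_eq_insert (e : PySem.Dict String (Int × Int × Int × Int))
    (p : String × Int × Int × Int × Int) :
    pvStepA e p = PySem.Dict.insert e p.1
      (match PySem.Dict.get? e p.1 with | none => p.2 | some x => pvComb x p.2) := by
  cases h : PySem.Dict.get? e p.1 <;> simp [pvStepA, h]

-- invariant of A's fold: the value at c is the left reduction with pvComb of the
-- values whose prefix is c, started from the accumulator's value (if any).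
theorem pvFoldA_get? (l : List (String × (Int × Int × Int × Int)))
    (e : PySem.Dict String (Int × Int × Int × Int)) (c : String) :
    (l.foldl pvStepA e).get? c =
      match PySem.Dict.get? e c, (l.filter (fun p => p.1 == c)).map (·.2) with
      | some x, vs => some (vs.foldl pvComb x)
      | none, [] => none
      | none, v :: vs => some (vs.foldl pvComb v) := by
  induction l generalizing e with
  | nil => cases h : PySem.Dict.get? e c <;> simp [h]
  | cons p rest ih =>
    by_cases hpc : p.1 = c
    · subst hpc
      rw [List.foldl_cons, ih]
      cases h : PySem.Dict.get? e p.1 with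
      | none => simp [pvStepA, h]
      | some x => simp [pvStepA, h]
    · rw [List.foldl_cons, ih]
      have hg : PySem.Dict.get? (pvStepA e p) c = PySem.Dict.get? e c := by
        rw [pvStepA_eq_insert, PySem.Dict.get?_insert]
        simp [Ne.symm hpc]
      rw [hg]
      have : (p.1 == c) = false := by simp [hpc]
      simp [this]

-- ===== VERDICT (by name: the statement is the Claim_ definition above) =====
-- both loops, re-read as folds over the (prefix, value) pairs
theorem pvA_eq_fold (data : List (String × Int × Int × Int × Int)) :
    combinePE data =
      ((data.map (fun kv => (kv.1 |> pvPrefix, kv.2))).foldl pvStepA PySem.Dict.empty).items := by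
  unfold combinePE
  refine congrArg PySem.Dict.items ?_
  rw [List.foldl_map]
  apply PySem.List.foldl_congr_mem
  intro e kv _
  cases h : PySem.Dict.get? e (pvPrefix kv.1) <;> simp [pvStepA, pvComb, h]

theorem pvB_eq_fold (data : List (String × Int × Int × Int × Int)) :
    combinePE_alt data =
      ((data.map (fun kv => (kv.1 |> pvPrefix, kv.2))).foldl
        (fun g p => PySem.Dict.modify g p.1 [] (· ++ [p.2])) PySem.Dict.empty).items.map
        (fun pv => (pv.1, pvReduce pv.2)) := by
  unfold combinePE_alt
  rw [List.foldl_map]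

theorem combinePE_spec : Claim_equal_combinePE := by
  intro data _
  unfold Spec_combinePE
  rw [pvA_eq_fold, pvB_eq_fold]
  set pl := data.map (fun kv => (kv.1 |> pvPrefix, kv.2)) with hpl
  set E := pl.foldl pvStepA PySem.Dict.empty with hE
  set G := pl.foldl (fun g p => PySem.Dict.modify g p.1 [] (· ++ [p.2])) PySem.Dict.empty with hG
  have hEfold : E = pl.foldl (fun e p => PySem.Dict.insert e p.1
      (match PySem.Dict.get? e p.1 with | none => p.2 | some x => pvComb x p.2)) PySem.Dict.empty := by
    rw [hE]; apply PySem.List.foldl_congr_mem; intro e p _; exact pvStepA_eq_insert e p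
  have hEkeys : E.keys = PySem.Set.update (PySem.Dict.empty : PySem.Dict String (Int × Int × Int × Int)).keys (pl.map (·.1)) := by
    rw [hEfold]
    exact PySem.Dict.keys_foldl_insert_key pl (·.1) _ _
  have hGkeys : G.keys = PySem.Set.update (PySem.Dict.empty : PySem.Dict String (List (Int × Int × Int × Int))).keys (pl.map (·.1)) := by
    rw [hG]
    exact PySem.Dict.keys_foldl_modify_key pl (·.1) [] (fun _ p => (· ++ [p.2])) _
  have hEnodup : E.keys.Nodup := by
    rw [hEfold]
    exact PySem.Dict.nodup_keys_foldl_insert_key pl (·.1) _ _ (by simp)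
  have hGnodup : G.keys.Nodup := by
    rw [hG]
    exact PySem.Dict.nodup_keys_foldl_modify_key pl (·.1) [] _ _ (by simp)
  simp only [PySem.Dict.keys_empty] at hEkeys hGkeys
  rw [PySem.Dict.items_eq_map_keys E hEnodup (0, 0, 0, 0),
      PySem.Dict.items_eq_map_keys G hGnodup [], List.map_map]
  rw [hGkeys, ← hEkeys]
  apply List.map_congr_left
  intro k hk
  -- k is a key of E, so some pair of pl has prefix k
  have hkmem : k ∈ pl.map (·.1) := by
    rw [hEkeys] at hk
    have : PySem.Set.update ([] : PySem.Set String) (pl.map (·.1)) = PySem.Set.ofList (pl.map (·.1)) := rfl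
    rw [this] at hk
    exact (PySem.Set.mem_ofList (pl.map (·.1)) k).mp hk
  have hfne : (pl.filter (fun p => p.1 == k)).map (·.2) ≠ [] := by
    obtain ⟨p, hp, hpk⟩ := List.mem_map.mp hkmem
    simp only [ne_eq, List.map_eq_nil_iff, List.filter_eq_nil_iff, not_forall]
    exact ⟨p, hp, by simp [hpk]⟩
  obtain ⟨v, vs, hf⟩ := List.exists_cons_of_ne_nil hfne
  have hEget : E.get? k = some (vs.foldl pvComb v) := by
    rw [hE, pvFoldA_get?, PySem.Dict.get?_empty, hf]
  have hGget : G.getD k [] = v :: vs := by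
    rw [hG, PySem.Dict.getD_foldl_modify_append, PySem.Dict.getD_empty, ← hf]
    simp
  have hGget' : (G.get? k).getD [] = v :: vs := by
    rw [← PySem.Dict.getD_eq_get?_getD]; exact hGget
  simp [Function.comp, PySem.Dict.getD_eq_get?_getD, hEget, hGget', pvReduce]
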